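-- pv_equiv track=rewrite | github.com/diothor/dcp-python | problems/others/problem_645.py | track_word
-- ===== SOURCE A (Python) =====
-- from typing import List
--
-- def track_word(word: str, w_size: int, iletter: int, matrix: List[List[str]], x: int, y: int, horizontal: bool) -> bool:
--     try:
--         if word[iletter] != matrix[y][x]:
--             return False
--         elif iletter == w_size - 1:
--             return True
--         elif horizontal:
--             return track_word(word, w_size, iletter + 1, matrix, x + 1, y, horizontal)
--         else:
--             return track_word(word, w_size, iletter + 1, matrix, x, y + 1, horizontal)
--     except IndexError:
--         return False
-- ===== SOURCE B (Python) =====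
-- def track_word(word, w_size, iletter, matrix, x, y, horizontal):
--     remaining = w_size - iletter        # letters still to match, current one included
--     if remaining <= 0:
--         return False
--     try:
--         for k in range(remaining):
--             cell = matrix[y][x + k] if horizontal else matrix[y + k][x]
--             if word[iletter + k] != cell:
--                 return False
--     except IndexError:
--         return False
--     return True
-- ===== Notes on version B (the rewrite author's own statement) =====
-- stated objective: alternative
-- what changed: Replaces the recursion that threads mutated coordinates through calls by a single for-loop over the k-th offset, computing each cell position directly from the start coordinates, with one try/except around the loop.
import Mathlib
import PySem

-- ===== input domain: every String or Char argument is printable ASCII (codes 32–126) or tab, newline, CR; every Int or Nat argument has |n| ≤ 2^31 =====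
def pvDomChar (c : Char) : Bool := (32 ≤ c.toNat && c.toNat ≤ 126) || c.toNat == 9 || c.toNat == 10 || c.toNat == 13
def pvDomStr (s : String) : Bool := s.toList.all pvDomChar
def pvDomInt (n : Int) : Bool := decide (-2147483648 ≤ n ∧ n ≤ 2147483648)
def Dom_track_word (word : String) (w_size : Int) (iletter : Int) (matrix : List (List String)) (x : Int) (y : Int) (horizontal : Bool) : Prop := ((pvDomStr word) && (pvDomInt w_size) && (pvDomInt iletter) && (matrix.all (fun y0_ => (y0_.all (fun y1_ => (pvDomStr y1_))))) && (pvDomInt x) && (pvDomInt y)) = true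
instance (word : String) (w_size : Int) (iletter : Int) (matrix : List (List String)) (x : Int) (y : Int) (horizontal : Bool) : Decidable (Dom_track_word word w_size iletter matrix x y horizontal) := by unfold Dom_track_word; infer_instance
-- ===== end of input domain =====

-- B replaces A's recursion (which threads mutated coordinates through calls) by one for-loop
-- over the k-th offset, computing each cell position from the start coordinates
-- (objective: alternative decomposition, same cost).

-- ===== PORT A =====
-- Termination fact for A's recursion, cited by name in decreasing_by below:
-- word[iletter] only succeeds for -len ≤ iletter < len, and iletter increases by 1 each call.
lemma pv_dec {word : String} {iletter : Int} {c : Char}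
    (hw : PySem.Str.pyGet? word iletter = some c) :
    ((word.toList.length : Int) + 1 - (iletter + 1)).toNat
      < ((word.toList.length : Int) + 1 - iletter).toNat := by
  rw [PySem.Str.pyGet?_eq, PySem.Chars.pyGet?_eq_listPyGet?] at hw
  have h2 := (PySem.List.pyGet?_eq_none_iff word.toList iletter)
  rw [hw] at h2
  simp only [PySem.Raise.InRange] at h2
  have h3 : -(word.toList.length : Int) ≤ iletter ∧ iletter < word.toList.length := by
    by_contra h; exact absurd (h2.mpr h) (by simp)
  omega

def track_word (word : String) (w_size : Int) (iletter : Int) (matrix : List (List String)) (x : Int) (y : Int) (horizontal : Bool) : Bool :=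
  match hw : PySem.Str.pyGet? word iletter,
        (PySem.List.pyGet? matrix y).bind (fun row => PySem.List.pyGet? row x) with
  | some c, some m =>
      if [c] ≠ m.toList then false
      else if iletter = w_size - 1 then true
      else if horizontal then track_word word w_size (iletter + 1) matrix (x + 1) y horizontal
      else track_word word w_size (iletter + 1) matrix x (y + 1) horizontal
  | _, _ => false   -- IndexError from word[iletter] or matrix[y][x]
termination_by ((word.toList.length : Int) + 1 - iletter).toNat
decreasing_by all_goals exact pv_dec hw

-- ===== PORT B =====
-- Source B's `for k in range(remaining)` loop, ported as a counting recursion (k counts up,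
-- `fuel` is the number of iterations left — range(n) is consumed lazily in Python).
-- Each iteration reads cell matrix[y][x+k] (or matrix[y+k][x]) and word[iletter+k];
-- a failed (IndexError) access or a mismatch returns false, loop exhaustion returns true.
def pvScan (word : String) (iletter : Int) (matrix : List (List String)) (x y : Int)
    (horizontal : Bool) : Int → Nat → Bool
  | _, 0 => true
  | k, fuel + 1 =>
    match (if horizontal then (PySem.List.pyGet? matrix y).bind (fun r => PySem.List.pyGet? r (x + k))
           else (PySem.List.pyGet? matrix (y + k)).bind (fun r => PySem.List.pyGet? r x)) with
    | none => false     -- IndexError from the cell access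
    | some m =>
      match PySem.Str.pyGet? word (iletter + k) with
      | none => false   -- IndexError from word[iletter + k]
      | some c =>
          if [c] ≠ m.toList then false
          else pvScan word iletter matrix x y horizontal (k + 1) fuel

def track_word_alt (word : String) (w_size : Int) (iletter : Int) (matrix : List (List String)) (x : Int) (y : Int) (horizontal : Bool) : Bool :=
  let remaining := w_size - iletter
  if remaining ≤ 0 then false
  else pvScan word iletter matrix x y horizontal 0 remaining.toNat

-- ===== PRECONDITION & SPEC =====
def Spec_track_word (word : String) (w_size : Int) (iletter : Int) (matrix : List (List String)) (x : Int) (y : Int) (horizontal : Bool) (out : Bool) : Prop := out = track_word_alt word w_size iletter matrix x y horizontal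
instance (word : String) (w_size : Int) (iletter : Int) (matrix : List (List String)) (x : Int) (y : Int) (horizontal : Bool) (out : Bool) : Decidable (Spec_track_word word w_size iletter matrix x y horizontal out) := by unfold Spec_track_word; infer_instance

-- ===== CLAIM (what is proved, stated in full; the proofs are below) =====
def Claim_equal_track_word : Prop := ∀ (word : String) (w_size : Int) (iletter : Int) (matrix : List (List String)) (x : Int) (y : Int) (horizontal : Bool), Dom_track_word word w_size iletter matrix x y horizontal → Spec_track_word word w_size iletter matrix x y horizontal (track_word word w_size iletter matrix x y horizontal)

-- ===== LEMMAS AND PROOFS =====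

-- moving the loop counter one step forward = moving the start coordinates one cell
lemma pvScan_shift (word : String) (iletter : Int) (matrix : List (List String)) (x y : Int)
    (horizontal : Bool) :
    ∀ (fuel : Nat) (k : Int),
      pvScan word iletter matrix x y horizontal (k + 1) fuel
        = pvScan word (iletter + 1) matrix (if horizontal then x + 1 else x)
            (if horizontal then y else y + 1) horizontal k fuel := by
  intro fuel
  induction fuel with
  | zero => intro k; rfl
  | succ fuel ih =>
    intro k
    cases horizontal with
    | true =>
      simp only [pvScan, if_true]
      rw [show x + (k + 1) = (x + 1) + k by ring, show iletter + (k + 1) = (iletter + 1) + k by ring,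
        ih (k + 1)]
      simp
    | false =>
      simp only [pvScan, Bool.false_eq_true, if_false]
      rw [show y + (k + 1) = (y + 1) + k by ring, show iletter + (k + 1) = (iletter + 1) + k by ring,
        ih (k + 1)]
      simp

lemma pv_main (word : String) (w_size : Int) (matrix : List (List String)) :
    ∀ (μ : Nat) (iletter x y : Int) (horizontal : Bool),
      (word.toList.length + 1 - iletter).toNat = μ →
      track_word word w_size iletter matrix x y horizontal
        = track_word_alt word w_size iletter matrix x y horizontal := by
  intro μ
  induction μ using Nat.strong_induction_on with
  | _ μ IH =>
  intro iletter x y horizontal hμ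
  rw [track_word.eq_def]
  simp only [track_word_alt]
  by_cases hr : w_size - iletter ≤ 0
  · -- nothing left to match: B is false; A keeps recursing and ends in false
    rw [if_pos hr]
    cases hw : PySem.Str.pyGet? word iletter with
    | none => rfl
    | some c =>
      cases hm : (PySem.List.pyGet? matrix y).bind (fun row => PySem.List.pyGet? row x) with
      | none => rfl
      | some m =>
        by_cases hc : [c] = m.toList
        · have hend : iletter ≠ w_size - 1 := by omega
          have hdec := pv_dec hw
          have hnext : ∀ x' y', track_word word w_size (iletter + 1) matrix x' y' horizontal = false := by
            intro x' y'
            rw [IH _ (by omega) (iletter + 1) x' y' horizontal rfl]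
            simp only [track_word_alt]
            rw [if_pos (by omega : w_size - (iletter + 1) ≤ 0)]
          simp only [hc, ne_eq, not_true_eq_false, if_false, hend]
          cases horizontal <;> simp [hnext]
        · simp [hc]
  · -- remaining ≥ 1
    rw [if_neg hr]
    have hfuel : (w_size - iletter).toNat = (w_size - iletter - 1).toNat + 1 := by omega
    rw [hfuel]
    cases hw : PySem.Str.pyGet? word iletter with
    | none =>
      simp only [pvScan]
      rw [show iletter + 0 = iletter by ring, hw]
      cases horizontal <;> simp only [if_true, Bool.false_eq_true, if_false] <;> (split <;> rfl)
    | some c =>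
      cases hm : (PySem.List.pyGet? matrix y).bind (fun row => PySem.List.pyGet? row x) with
      | none =>
        simp only [pvScan]
        rw [show x + 0 = x by ring, show y + 0 = y by ring]
        cases horizontal <;> simp [hm]
      | some m =>
        have hcell : ∀ h : Bool,
            (if h = true then (PySem.List.pyGet? matrix y).bind (fun r => PySem.List.pyGet? r (x + 0))
             else (PySem.List.pyGet? matrix (y + 0)).bind (fun r => PySem.List.pyGet? r x)) = some m := by
          intro h
          rw [show x + 0 = x by ring, show y + 0 = y by ring]
          cases h <;> simp [hm]
        by_cases hc : [c] = m.toList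
        · by_cases hend : iletter = w_size - 1
          · -- last letter: A returns true; B's loop has exactly one iteration left
            have h1 : (w_size - iletter - 1).toNat = 0 := by omega
            simp only [pvScan, hcell horizontal, show iletter + 0 = iletter by ring, hw, h1]
            simp [hc, hend]
          · -- A recurses; B's head iteration succeeds and the tail is B at the next cell
            have hdec := pv_dec hw
            have hstep : pvScan word iletter matrix x y horizontal 0 ((w_size - iletter - 1).toNat + 1)
                = pvScan word (iletter + 1) matrix (if horizontal then x + 1 else x)
                    (if horizontal then y else y + 1) horizontal 0 (w_size - iletter - 1).toNat := by
              simp only [pvScan, hcell horizontal, show iletter + 0 = iletter by ring, hw]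
              rw [if_neg (by simp [hc]), show (0:Int) + 1 = 0 + 1 by ring, pvScan_shift]
            rw [hstep]
            have hrem : ¬ (w_size - (iletter + 1) ≤ 0) := by omega
            have hnext : ∀ x' y', track_word word w_size (iletter + 1) matrix x' y' horizontal
                = pvScan word (iletter + 1) matrix x' y' horizontal 0 (w_size - iletter - 1).toNat := by
              intro x' y'
              rw [IH _ (by omega) (iletter + 1) x' y' horizontal rfl]
              simp only [track_word_alt]
              rw [if_neg hrem, show w_size - (iletter + 1) = w_size - iletter - 1 by ring]
            simp only [hc, ne_eq, not_true_eq_false, if_false, hend]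
            cases horizontal <;> simp [hnext]
        · simp only [pvScan, hcell horizontal, show iletter + 0 = iletter by ring, hw]
          rw [if_pos (by simp [hc])]
          simp [hc]

-- ===== VERDICT (by name: the statement is the Claim_ definition above) =====
theorem track_word_spec : Claim_equal_track_word := by
  intro word w_size iletter matrix x y horizontal _
  exact pv_main word w_size matrix _ iletter x y horizontal rfl
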